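-- pv_equiv track=rewrite | github.com/NiceTry3675/AI_NurtureNote | app/analysis_normalization.py | extract_trailing_parenthetical
-- ===== SOURCE A (Python) =====
-- from typing import Any, Dict, List, Optional
--
-- def extract_trailing_parenthetical(text: str) -> Optional[tuple[str, str]]:
--     if not text.endswith(")"):
--         return None
--     depth = 0
--     for index in range(len(text) - 1, -1, -1):
--         char = text[index]
--         if char == ')':
--             depth += 1
--             continue
--         if char == '(':
--             depth -= 1
--             if depth == 0:
--                 preceding = text[:index]
--                 parenthetical = text[index:]
--                 return preceding, parenthetical
--             if depth < 0:
--                 return None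
--     return None
-- ===== SOURCE B (Python) =====
-- def extract_trailing_parenthetical(text):
--     # Forward single pass: maintain a stack of '(' indices; each ')' pops its
--     # match (or None when unmatched).  The answer is the match of the final ')'.
--     if not text or text[-1] != ')':
--         return None
--     stack = []
--     last_match = None
--     for i, ch in enumerate(text):
--         if ch == '(':
--             stack.append(i)
--         elif ch == ')':
--             last_match = stack.pop() if stack else None
--     if last_match is None:
--         return None
--     return text[:last_match], text[last_match:]
-- ===== Notes on version B (the rewrite author's own statement) =====
-- stated objective: alternative
-- what changed: Replaced the backward early-exit depth scan with a single forward pass maintaining a stack of '(' indices, splitting at the recorded match of the final ')'.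
import Mathlib
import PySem

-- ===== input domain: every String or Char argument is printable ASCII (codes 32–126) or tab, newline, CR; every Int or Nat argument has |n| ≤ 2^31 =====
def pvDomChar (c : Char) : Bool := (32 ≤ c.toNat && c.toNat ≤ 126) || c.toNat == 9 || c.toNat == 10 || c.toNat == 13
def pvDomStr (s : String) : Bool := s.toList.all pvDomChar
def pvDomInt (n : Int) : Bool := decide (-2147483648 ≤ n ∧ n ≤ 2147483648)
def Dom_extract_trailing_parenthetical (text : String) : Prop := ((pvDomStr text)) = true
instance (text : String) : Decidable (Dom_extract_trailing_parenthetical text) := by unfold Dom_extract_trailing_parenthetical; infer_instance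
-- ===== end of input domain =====

-- B replaces A's backward early-exit depth scan by a forward stack-based paren
-- matcher (alternative algorithm, same cost); return values agree everywhere.

-- ===== PORT A =====
-- 'for index in range(len(text)-1, -1, -1)' ported as a Nat countdown: the call
-- with k = len(text) processes indices len-1, len-2, …, 0, exactly Python's range.
def loopA (text : String) (k : Nat) (depth : Int) : Option (String × String) :=
  match k with
  | 0 => none                                   -- loop finished: 'return None'
  | Nat.succ k' =>
    match PySem.Str.pyGet? text (k' : Int) with  -- char = text[index]
    | none => none                               -- unreachable: index in range
    | some c =>
      if c = ')' then loopA text k' (depth + 1)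
      else if c = '(' then
        let d := depth - 1
        if d = 0 then
          some (PySem.Str.slice text none (some (k' : Int)),
                PySem.Str.slice text (some (k' : Int)) none)
        else if d < 0 then none
        else loopA text k' d
      else loopA text k' depth

def extract_trailing_parenthetical (text : String) : Option (String × String) :=
  if PySem.Str.endswith text ")" then loopA text text.length 0 else none

-- ===== PORT B =====
-- Python's list used as a stack (append/pop at the end) is modelled cons-front:
-- append = cons, pop = head/tail.  State = (stack of '(' indices, last match).
def stepB (s : List Int × Option Int) (p : Int × Char) : List Int × Option Int :=
  if p.2 = '(' then (p.1 :: s.1, s.2)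
  else if p.2 = ')' then (s.1.tail, s.1.head?)   -- 'stack.pop() if stack else None'
  else s

def extract_trailing_parenthetical_alt (text : String) : Option (String × String) :=
  match PySem.Str.pyGet? text (-1) with          -- 'not text or text[-1] != …'
  | none => none
  | some c =>
    if c ≠ ')' then none
    else
      match ((PySem.List.enumerate text.toList 0).foldl stepB ([], none)).2 with
      | none => none
      | some i => some (PySem.Str.slice text none (some i),
                        PySem.Str.slice text (some i) none)

-- ===== PRECONDITION & SPEC =====
def Spec_extract_trailing_parenthetical (text : String) (out : Option (String × String)) : Prop := out = extract_trailing_parenthetical_alt text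
instance (text : String) (out : Option (String × String)) : Decidable (Spec_extract_trailing_parenthetical text out) := by unfold Spec_extract_trailing_parenthetical; infer_instance

-- ===== CLAIM (what is proved, stated in full; the proofs are below) =====
def Claim_equal_extract_trailing_parenthetical : Prop := ∀ (text : String), Dom_extract_trailing_parenthetical text → Spec_extract_trailing_parenthetical text (extract_trailing_parenthetical text)

-- ===== LEMMAS AND PROOFS =====

-- stack component of B's fold (B's step restricted to its first component)
def stkStep (st : List Int) (p : Int × Char) : List Int :=
  if p.2 = '(' then p.1 :: st else if p.2 = ')' then st.tail else st

lemma stepB_fst (ps : List (Int × Char)) : ∀ (st : List Int) (l : Option Int),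
    (ps.foldl stepB (st, l)).1 = ps.foldl stkStep st := by
  induction ps with
  | nil => intro st l; rfl
  | cons p ps ih =>
    intro st l
    simp only [List.foldl_cons, stepB, stkStep]
    split_ifs <;> apply ih

lemma loopA_eq (text : String) (k : Nat) (hk : k ≤ text.toList.length) :
    ∀ d : Int, 1 ≤ d →
    loopA text k d =
      (((PySem.List.enumerate (text.toList.take k) 0).foldl stkStep [])[(d-1).toNat]?).map
        (fun i => (PySem.Str.slice text none (some i), PySem.Str.slice text (some i) none)) := by
  induction k with
  | zero => intro d hd; simp [loopA]
  | succ k ih =>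
    intro d hd
    have hklt : k < text.toList.length := by omega
    have htake : text.toList.take (k+1) = text.toList.take k ++ [text.toList[k]] := by
      rw [List.take_add_one]; simp [List.getElem?_eq_getElem hklt]
    have hlen : (text.toList.take k).length = k := by rw [List.length_take]; omega
    have henum : PySem.List.enumerate (text.toList.take (k+1)) 0
        = PySem.List.enumerate (text.toList.take k) 0 ++ [((k : Int), text.toList[k])] := by
      rw [htake, PySem.List.enumerate_append]
      simp [PySem.List.enumerate, hlen]
    have hget : PySem.Str.pyGet? text (k : Int) = some text.toList[k] := by
      simp [PySem.List.pyGet?_natCast, List.getElem?_eq_getElem hklt]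
    rw [henum, List.foldl_append, List.foldl_cons, List.foldl_nil]
    rw [loopA, hget]; dsimp only
    by_cases hc : text.toList[k] = ')'
    · rw [if_pos hc, hc]
      rw [show stkStep ((PySem.List.enumerate (text.toList.take k) 0).foldl stkStep [])
            ((k : Int), ')') =
          ((PySem.List.enumerate (text.toList.take k) 0).foldl stkStep []).tail from by
        simp [stkStep]]
      rw [ih (by omega) (d+1) (by omega)]
      have h1 : (d + 1 - 1).toNat = (d-1).toNat + 1 := by omega
      rw [h1, List.getElem?_tail]
    · by_cases ho : text.toList[k] = '('
      · rw [if_neg hc, if_pos ho, ho]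
        rw [show stkStep ((PySem.List.enumerate (text.toList.take k) 0).foldl stkStep [])
              ((k : Int), '(') =
            (k : Int) :: (PySem.List.enumerate (text.toList.take k) 0).foldl stkStep [] from by
          simp [stkStep]]
        by_cases hd1 : d - 1 = 0
        · rw [if_pos hd1, hd1]
          norm_num
        · have hd2 : 2 ≤ d := by omega
          rw [if_neg hd1, if_neg (by omega : ¬ (d - 1 < 0))]
          rw [ih (by omega) (d-1) (by omega)]
          have h1 : (d - 1).toNat = (d - 1 - 1).toNat + 1 := by omega
          rw [h1, List.getElem?_cons_succ]
      · rw [if_neg hc, if_neg ho]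
        rw [show stkStep ((PySem.List.enumerate (text.toList.take k) 0).foldl stkStep [])
              ((k : Int), text.toList[k]) =
            (PySem.List.enumerate (text.toList.take k) 0).foldl stkStep [] from by
          simp [stkStep, hc, ho]]
        exact ih (by omega) d hd

lemma endswith_paren (text : String) :
    PySem.Str.endswith text ")" = true ↔
      ∃ front, text.toList = front ++ [')'] := by
  simp only [PySem.Str.endswith_eq]
  constructor
  · intro h
    have hs : [')'] <:+ text.toList := (PySem.Chars.endswith_iff _ _).1 (by simpa using h)
    obtain ⟨front, hf⟩ := hs
    exact ⟨front, hf.symm⟩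
  · rintro ⟨front, hf⟩
    have : [')'] <:+ text.toList := ⟨front, hf.symm⟩
    simpa using (PySem.Chars.endswith_iff (text.toList) [')']).2 this

-- ===== VERDICT (by name: the statement is the Claim_ definition above) =====
theorem extract_trailing_parenthetical_spec : Claim_equal_extract_trailing_parenthetical := by
  intro text _
  unfold Spec_extract_trailing_parenthetical
  unfold extract_trailing_parenthetical extract_trailing_parenthetical_alt
  by_cases hend : PySem.Str.endswith text ")" = true
  · obtain ⟨front, hf⟩ := (endswith_paren text).1 hend
    have hlast : PySem.Str.pyGet? text (-1) = some ')' := by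
      simp [hf, PySem.List.pyGet?_neg_one_append_singleton]
    rw [if_pos hend, hlast]
    simp only [if_neg (by simp : ¬ (')' ≠ ')'))]
    have hlen : text.toList.length = front.length + 1 := by simp [hf]
    have htake : text.toList.take front.length = front := by
      rw [hf]; simp
    have henum : PySem.List.enumerate text.toList 0
        = PySem.List.enumerate front 0 ++ [((front.length : Int), ')')] := by
      rw [hf, PySem.List.enumerate_append]; simp [PySem.List.enumerate]
    have hA : loopA text text.length 0 =
        ((((PySem.List.enumerate front 0).foldl stkStep [])[0]?).map
          (fun i => (PySem.Str.slice text none (some i), PySem.Str.slice text (some i) none))) := by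
      rw [show text.length = front.length + 1 from by simpa using hlen, loopA]
      have hget : PySem.Str.pyGet? text ((front.length : Nat) : Int) = some ')' := by
        simp only [PySem.Str.pyGet?_eq, PySem.Chars.pyGet?_eq_listPyGet?, hf,
          PySem.List.pyGet?_natCast]
        simp
      rw [hget]
      dsimp only
      rw [if_pos rfl]
      rw [loopA_eq text front.length (by omega) (0+1) (by omega)]
      rw [htake]
      norm_num
    rw [hA, henum, List.foldl_append]
    simp only [List.foldl_cons, List.foldl_nil, stepB]
    rw [stepB_fst]
    simp only [if_neg (by decide : ¬ ((')' : Char) = '('))]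
    rw [List.head?_eq_getElem?]
    cases h : ((PySem.List.enumerate front 0).foldl stkStep [])[0]? with
    | none => simp [h]
    | some i => simp [h]
  · rw [if_neg hend]
    cases hg : PySem.Str.pyGet? text (-1) with
    | none => rfl
    | some c =>
      by_cases hc : c = ')'
      · exfalso
        subst hc
        have : text.toList.getLast? = some ')' := by
          simpa [PySem.List.pyGet?_neg_one] using hg
        obtain ⟨front, hf⟩ : ∃ front, text.toList = front ++ [')'] := by
          rcases List.eq_nil_or_concat text.toList with h0 | ⟨ys, y, hy⟩
          · rw [h0] at this; simp at this
          · rw [hy] at this; simp at this; exact ⟨ys, by rw [hy, this]; simp⟩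
        exact hend ((endswith_paren text).2 ⟨front, hf⟩)
      · simp [hg, hc]
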